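-- pv_equiv track=rewrite | github.com/mindbomber/Alignment-Aware-Neural-Architecture--AANA- | eval_pipeline/mi_pilot.py | _initial_recommended_action
-- ===== SOURCE A (Python) =====
-- from typing import Any
--
-- def _initial_recommended_action(verifier_scores: dict[str, Any]) -> str:
--     statuses = [
--         block.get("status")
--         for layer in ("P", "B", "C", "F")
--         for block in [verifier_scores.get(layer)]
--         if isinstance(block, dict)
--     ]
--     if any(status == "fail" for status in statuses):
--         return "revise"
--     if any(status == "unknown" for status in statuses):
--         return "ask"
--     if any(status == "warn" for status in statuses):
--         return "revise"
--     return "accept"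
-- ===== SOURCE B (Python) =====
-- _SEVERITY = {"fail": 3, "unknown": 2, "warn": 1}
-- _ACTIONS = ("accept", "revise", "ask", "revise")
--
--
-- def _initial_recommended_action(verifier_scores: dict) -> str:
--     worst = 0
--     for layer in ("P", "B", "C", "F"):
--         block = verifier_scores.get(layer)
--         if isinstance(block, dict):
--             worst = max(worst, _SEVERITY.get(block.get("status"), 0))
--     return _ACTIONS[worst]
-- ===== Notes on version B (the rewrite author's own statement) =====
-- stated objective: alternative
-- what changed: Replaces the comprehension-built status list plus three priority-ordered any() scans with a numeric reduction: each status is mapped to a severity (fail=3, unknown=2, warn=1, other=0), a single pass keeps the maximum, and the result is read from an action table indexed by that maximum.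
import Mathlib
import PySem

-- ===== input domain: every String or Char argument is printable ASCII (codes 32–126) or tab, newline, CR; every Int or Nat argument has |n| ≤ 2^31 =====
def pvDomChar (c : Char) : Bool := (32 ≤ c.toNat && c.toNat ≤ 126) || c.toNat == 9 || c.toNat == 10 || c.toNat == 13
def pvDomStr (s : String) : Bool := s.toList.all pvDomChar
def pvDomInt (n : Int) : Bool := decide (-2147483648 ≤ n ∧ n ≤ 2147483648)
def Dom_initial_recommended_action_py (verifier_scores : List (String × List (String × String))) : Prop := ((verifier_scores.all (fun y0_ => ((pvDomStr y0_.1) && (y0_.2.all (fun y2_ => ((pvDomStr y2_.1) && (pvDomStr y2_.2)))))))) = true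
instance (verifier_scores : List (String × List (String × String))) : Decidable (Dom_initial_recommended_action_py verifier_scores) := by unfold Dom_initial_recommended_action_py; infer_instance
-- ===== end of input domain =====

-- B maps each status to a numeric severity (fail=3, unknown=2, warn=1, other=0), reduces the four
-- layers to one maximum severity and indexes an action table with it, instead of A's status list
-- scanned by three priority-ordered any() passes; same result, a different (arithmetic) decomposition.

-- ===== PORT A =====
-- statuses = [block.get("status") for layer in ("P","B","C","F") for block in [verifier_scores.get(layer)] if isinstance(block, dict)]
-- (under the type convention every value of verifier_scores is a dict, so the isinstance test passes whenever the key is present)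
def pvStatuses (verifier_scores : List (String × List (String × String))) : List (Option String) :=
  ["P", "B", "C", "F"].filterMap (fun layer =>
    match PySem.Dict.get? (PySem.Dict.mk verifier_scores) layer with
    | some block => some (PySem.Dict.get? (PySem.Dict.mk block) "status")
    | none => none)

def initial_recommended_action_py (verifier_scores : List (String × List (String × String))) : String :=
  if (pvStatuses verifier_scores).any (fun status => status == some "fail") then "revise"
  else if (pvStatuses verifier_scores).any (fun status => status == some "unknown") then "ask"
  else if (pvStatuses verifier_scores).any (fun status => status == some "warn") then "revise"
  else "accept"

-- ===== PORT B =====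
-- _SEVERITY = {"fail": 3, "unknown": 2, "warn": 1}
def pvSeverity : PySem.Dict String Int := PySem.Dict.mk [("fail", 3), ("unknown", 2), ("warn", 1)]
-- _ACTIONS = ("accept", "revise", "ask", "revise")
def pvActions : List String := ["accept", "revise", "ask", "revise"]

-- _SEVERITY.get(status, 0); a .get with key None (status absent) misses every string key, hence 0
def pvSev (status : Option String) : Int :=
  match status with
  | some s => PySem.Dict.getD pvSeverity s 0
  | none => 0

def pvWorst (verifier_scores : List (String × List (String × String))) : Int :=
  ["P", "B", "C", "F"].foldl (fun worst layer =>
    match PySem.Dict.get? (PySem.Dict.mk verifier_scores) layer with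
    | some block => max worst (pvSev (PySem.Dict.get? (PySem.Dict.mk block) "status"))
    | none => worst) 0

def initial_recommended_action_py_alt (verifier_scores : List (String × List (String × String))) : String :=
  -- _ACTIONS[worst]: worst is always one of 0,1,2,3, so the tuple index is in range
  (PySem.List.pyGet? pvActions (pvWorst verifier_scores)).getD ""

-- ===== PRECONDITION & SPEC =====
def Spec_initial_recommended_action_py (verifier_scores : List (String × List (String × String))) (out : String) : Prop := out = initial_recommended_action_py_alt verifier_scores
instance (verifier_scores : List (String × List (String × String))) (out : String) : Decidable (Spec_initial_recommended_action_py verifier_scores out) := by unfold Spec_initial_recommended_action_py; infer_instance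

-- ===== CLAIM (what is proved, stated in full; the proofs are below) =====
def Claim_equal_initial_recommended_action_py : Prop := ∀ (verifier_scores : List (String × List (String × String))), Dom_initial_recommended_action_py verifier_scores → Spec_initial_recommended_action_py verifier_scores (initial_recommended_action_py verifier_scores)

-- ===== LEMMAS AND PROOFS =====

-- a status string that is none of the three severity keys scores 0
theorem pvSev_other (str : String) (h1 : str ≠ "fail") (h2 : str ≠ "unknown") (h3 : str ≠ "warn") :
    pvSev (some str) = 0 := by
  simp only [pvSev, pvSeverity, PySem.Dict.getD, PySem.Dict.get?]
  rw [List.find?_cons_of_neg (by simp; exact Ne.symm h1),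
      List.find?_cons_of_neg (by simp; exact Ne.symm h2),
      List.find?_cons_of_neg (by simp; exact Ne.symm h3)]
  rfl

-- severity lookup as a decision ladder on the status
theorem pvSev_eq (s : Option String) :
    pvSev s = if s == some "fail" then 3 else if s == some "unknown" then 2
      else if s == some "warn" then 1 else 0 := by
  cases s with
  | none => rfl
  | some str =>
    by_cases h1 : str = "fail"
    · subst h1; rfl
    by_cases h2 : str = "unknown"
    · subst h2; rfl
    by_cases h3 : str = "warn"
    · subst h3; rfl
    rw [pvSev_other str h1 h2 h3]
    simp [h1, h2, h3]

-- B's fold over the layer names is the severity fold over A's filterMap-built status list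
theorem pvFold_eq (vs : List (String × List (String × String))) (layers : List String) (a : Int) :
    layers.foldl (fun worst layer =>
      match PySem.Dict.get? (PySem.Dict.mk vs) layer with
      | some block => max worst (pvSev (PySem.Dict.get? (PySem.Dict.mk block) "status"))
      | none => worst) a
    = (layers.filterMap (fun layer =>
        match PySem.Dict.get? (PySem.Dict.mk vs) layer with
        | some block => some (PySem.Dict.get? (PySem.Dict.mk block) "status")
        | none => none)).foldl (fun worst s => max worst (pvSev s)) a := by
  induction layers generalizing a with
  | nil => rfl
  | cons l ls ih =>
    simp only [List.foldl_cons, List.filterMap_cons]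
    cases PySem.Dict.get? (PySem.Dict.mk vs) l with
    | none => exact ih a
    | some blk => exact ih _

-- the max severity of a status list equals A's fail > unknown > warn priority ladder
theorem pvMax_char (xs : List (Option String)) (a : Int) (ha : 0 ≤ a) :
    xs.foldl (fun worst s => max worst (pvSev s)) a
    = max a (if xs.any (fun status => status == some "fail") then 3
      else if xs.any (fun status => status == some "unknown") then 2
      else if xs.any (fun status => status == some "warn") then 1 else 0) := by
  induction xs generalizing a with
  | nil => simp; omega
  | cons s xs ih =>
    simp only [List.foldl_cons, List.any_cons]
    rw [pvSev_eq s]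
    rw [ih _ (le_max_of_le_left ha)]
    by_cases hf : s = some "fail"
    · simp [hf]; split_ifs <;> omega
    by_cases hu : s = some "unknown"
    · simp [hu]; split_ifs <;> omega
    by_cases hw : s = some "warn"
    · simp [hw]; split_ifs <;> omega
    · simp [hf, hu, hw]; split_ifs <;> omega

theorem pvWorst_char (vs : List (String × List (String × String))) :
    pvWorst vs = max 0 (if (pvStatuses vs).any (fun status => status == some "fail") then 3
      else if (pvStatuses vs).any (fun status => status == some "unknown") then 2
      else if (pvStatuses vs).any (fun status => status == some "warn") then 1 else 0) := by
  unfold pvWorst pvStatuses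
  rw [pvFold_eq, pvMax_char _ 0 le_rfl]

-- ===== VERDICT (by name: the statement is the Claim_ definition above) =====
theorem initial_recommended_action_py_spec : Claim_equal_initial_recommended_action_py := by
  intro vs _
  unfold Spec_initial_recommended_action_py
  unfold initial_recommended_action_py initial_recommended_action_py_alt
  rw [pvWorst_char]
  split_ifs <;> rfl
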